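-- pv_equiv track=rewrite | github.com/mun-gio/programmers | 프로그래머스/0/181874. A 강조하기/A 강조하기.py | solution
-- ===== SOURCE A (Python) =====
-- def solution(myString):
--     answer = ''
--     for a in myString:
--         if a == 'a' or a == "A":
--             answer += a.upper()
--         else:
--             answer += a.lower()
--     return answer
-- ===== SOURCE B (Python) =====
-- def solution(myString):
--     return myString.lower().replace('a', 'A')
-- ===== Notes on version B (the rewrite author's own statement) =====
-- stated objective: idiomatic
-- what changed: Replaces the per-character branch-and-accumulate loop with two whole-string library passes: lowercase everything, then replace the target letter with its uppercase form.
import Mathlib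
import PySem

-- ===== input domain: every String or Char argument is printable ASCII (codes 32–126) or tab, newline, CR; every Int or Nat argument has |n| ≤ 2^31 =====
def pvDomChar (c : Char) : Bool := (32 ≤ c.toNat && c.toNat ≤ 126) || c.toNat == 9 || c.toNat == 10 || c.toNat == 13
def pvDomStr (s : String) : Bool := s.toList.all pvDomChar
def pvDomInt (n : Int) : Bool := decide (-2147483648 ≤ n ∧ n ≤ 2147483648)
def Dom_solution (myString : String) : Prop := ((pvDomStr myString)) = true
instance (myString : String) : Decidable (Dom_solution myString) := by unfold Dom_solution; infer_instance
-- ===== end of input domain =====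

-- B lowercases the whole string in one library pass, then replaces 'a' with 'A' (idiomatic two-pass form of A's per-character loop).


-- ===== PORT A =====
-- for a in myString: answer += a.upper() if a in 'aA' else a.lower()
def solution (myString : String) : String :=
  myString.toList.foldl
    (fun answer a =>
      if a = 'a' ∨ a = 'A' then answer ++ PySem.Str.upper (String.ofList [a])
      else answer ++ PySem.Str.lower (String.ofList [a]))
    ""

-- ===== PORT B =====
-- return myString.lower().replace('a', 'A')
def solution_alt (myString : String) : String :=
  PySem.Str.replace (PySem.Str.lower myString) "a" "A"

-- ===== PRECONDITION & SPEC =====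
def Spec_solution (myString : String) (out : String) : Prop := out = solution_alt myString
instance (myString : String) (out : String) : Decidable (Spec_solution myString out) := by unfold Spec_solution; infer_instance

-- ===== CLAIM (what is proved, stated in full; the proofs are below) =====
def Claim_equal_solution : Prop := ∀ (myString : String), Dom_solution myString → Spec_solution myString (solution myString)

-- ===== LEMMAS AND PROOFS =====

-- the per-character transform A applies
def pvStepA (c : Char) : Char :=
  if c = 'a' ∨ c = 'A' then PySem.Chars.upperChar c else PySem.Chars.lowerChar c

lemma solution_toList_aux (l : List Char) (acc : String) :
    (l.foldl (fun answer a =>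
        if a = 'a' ∨ a = 'A' then answer ++ PySem.Str.upper (String.ofList [a])
        else answer ++ PySem.Str.lower (String.ofList [a])) acc).toList
      = acc.toList ++ l.map pvStepA := by
  induction l generalizing acc with
  | nil => simp
  | cons c t ih =>
    simp only [List.foldl, List.map]
    by_cases h : c = 'a' ∨ c = 'A'
    · rw [if_pos h, ih]
      simp [pvStepA, h, PySem.Str.upper, PySem.Chars.upper, String.toList_ofList]
    · rw [if_neg h, ih]
      simp [pvStepA, h, PySem.Str.lower, PySem.Chars.lower, String.toList_ofList]

lemma replace_go_a (l : List Char) (acc : List Char) :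
    PySem.Chars.replace.go ['a'] ['A'] l.length l acc
      = acc.reverse ++ l.map (fun c => if c = 'a' then 'A' else c) := by
  induction l generalizing acc with
  | nil => simp [PySem.Chars.replace.go]
  | cons c t ih =>
    show PySem.Chars.replace.go ['a'] ['A'] (t.length + 1) (c :: t) acc = _
    rw [PySem.Chars.replace.go]
    by_cases h : c = 'a'
    · subst h
      simp [List.isPrefixOf, ih]
    · have hp : (['a'].isPrefixOf (c :: t)) = false := by
        simp [List.isPrefixOf, show ¬'a' = c from fun hh => h hh.symm]
      simp [hp, ih, h]

lemma replace_a (l : List Char) :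
    PySem.Chars.replace l ['a'] ['A'] = l.map (fun c => if c = 'a' then 'A' else c) := by
  rw [PySem.Chars.replace]
  simp [replace_go_a]

lemma lowerChar_eq_a {c : Char} (h : PySem.Chars.lowerChar c = 'a') : c = 'a' ∨ c = 'A' := by
  unfold PySem.Chars.lowerChar PySem.Chars.isupper at h
  split_ifs at h with hu
  · right
    simp only [Bool.and_eq_true, decide_eq_true_eq, Char.le_def, UInt32.le_iff_toNat_le] at hu
    have hle : c.toNat ≤ 90 := hu.2
    have hval : (c.toNat + 32).isValidChar := Or.inl (by omega)
    have hv : (Char.ofNat (c.toNat + 32)).toNat = c.toNat + 32 := by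
      rw [Char.toNat_ofNat, if_pos hval]
    have h65 : c.toNat = 65 := by
      have := congrArg Char.toNat h
      rw [hv] at this
      simpa using this
    exact Char.ext (UInt32.toNat_inj.mp (by simpa using h65))
  · exact Or.inl h

lemma step_char (c : Char) :
    pvStepA c = (if PySem.Chars.lowerChar c = 'a' then 'A' else PySem.Chars.lowerChar c) := by
  by_cases h1 : c = 'a'
  · subst h1; decide
  by_cases h2 : c = 'A'
  · subst h2; decide
  have hne : PySem.Chars.lowerChar c ≠ 'a' := fun h => (lowerChar_eq_a h).elim h1 h2
  simp [pvStepA, h1, h2, hne]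

-- ===== VERDICT (by name: the statement is the Claim_ definition above) =====
theorem solution_spec : Claim_equal_solution := by
  intro s _
  unfold Spec_solution solution solution_alt
  apply String.toList_inj.mp
  rw [solution_toList_aux]
  simp only [PySem.Str.replace, PySem.Str.lower, String.toList_ofList,
    show ("a" : String).toList = ['a'] from rfl, show ("A" : String).toList = ['A'] from rfl]
  rw [replace_a]
  simp only [PySem.Chars.lower, List.map_map]
  exact List.map_congr_left fun c _ => step_char c
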